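-- pv_equiv track=rewrite | github.com/Bootcamp-IA-P4/ADD4U | backend/agents/prompt_manager.py | extract_citas
-- ===== SOURCE A (Python) =====
-- def extract_citas(rag_results):
--     """
--     Extrae citas golden y normativas de los resultados RAG.
--     """
--     citas_golden = []
--     citas_normativa = []
--     for item in rag_results or []:
--         if item.get('type') == 'golden':
--             citas_golden.append(item.get('content', ''))
--         elif item.get('type') == 'normativa':
--             citas_normativa.append(item.get('content', ''))
--     return citas_golden, citas_normativa
-- ===== SOURCE B (Python) =====
-- def extract_citas(rag_results):
--     """
--     Extrae citas golden y normativas de los resultados RAG.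
--     Group-then-select: build a type -> contents table in one unconditional
--     pass, then pick the two wanted keys.
--     """
--     pairs = [(item.get('type'), item.get('content', '')) for item in rag_results or []]
--     grouped = {}
--     for k, c in pairs:
--         grouped.setdefault(k, []).append(c)
--     return grouped.get('golden', []), grouped.get('normativa', [])
-- ===== Notes on version B (the rewrite author's own statement) =====
-- stated objective: alternative
-- what changed: Replaces the if/elif branching into two inline lists by an unconditional grouping of all items into a type->contents dict, selecting the 'golden' and 'normativa' keys afterward.
import Mathlib
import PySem

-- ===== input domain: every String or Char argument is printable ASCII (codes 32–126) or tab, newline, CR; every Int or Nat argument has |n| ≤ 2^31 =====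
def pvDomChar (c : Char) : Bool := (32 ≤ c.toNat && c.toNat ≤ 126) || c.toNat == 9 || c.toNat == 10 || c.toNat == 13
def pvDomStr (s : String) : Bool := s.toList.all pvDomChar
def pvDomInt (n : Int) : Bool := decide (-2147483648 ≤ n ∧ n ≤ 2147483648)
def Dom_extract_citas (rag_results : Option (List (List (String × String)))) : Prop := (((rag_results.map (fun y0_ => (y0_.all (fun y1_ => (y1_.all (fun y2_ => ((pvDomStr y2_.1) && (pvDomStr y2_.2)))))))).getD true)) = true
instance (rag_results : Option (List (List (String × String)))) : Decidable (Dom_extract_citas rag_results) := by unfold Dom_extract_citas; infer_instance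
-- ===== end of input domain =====

-- B groups all items into a type->contents table in one unconditional pass and selects
-- the two wanted keys afterward, instead of A's if/elif filling two lists inline.

-- ===== PORT A =====
def extract_citas (rag_results : Option (List (List (String × String)))) : List String × List String :=
  (rag_results.getD []).foldl
    (fun acc item =>
      if (PySem.Dict.mk item).get? "type" == some "golden" then
        (acc.1 ++ [(PySem.Dict.mk item).getD "content" ""], acc.2)
      else if (PySem.Dict.mk item).get? "type" == some "normativa" then
        (acc.1, acc.2 ++ [(PySem.Dict.mk item).getD "content" ""])
      else acc)
    ([], [])

-- ===== PORT B =====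
def extract_citas_alt (rag_results : Option (List (List (String × String)))) : List String × List String :=
  let pairs := (rag_results.getD []).map
    (fun item => ((PySem.Dict.mk item).get? "type", (PySem.Dict.mk item).getD "content" ""))
  let grouped := pairs.foldl
    (fun d p => d.modify p.1 [] (· ++ [p.2])) PySem.Dict.empty
  (grouped.getD (some "golden") [], grouped.getD (some "normativa") [])

-- ===== PRECONDITION & SPEC =====
def Spec_extract_citas (rag_results : Option (List (List (String × String)))) (out : List String × List String) : Prop := out = extract_citas_alt rag_results
instance (rag_results : Option (List (List (String × String)))) (out : List String × List String) : Decidable (Spec_extract_citas rag_results out) := by unfold Spec_extract_citas; infer_instance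

-- ===== CLAIM (what is proved, stated in full; the proofs are below) =====
def Claim_equal_extract_citas : Prop := ∀ (rag_results : Option (List (List (String × String)))), Dom_extract_citas rag_results → Spec_extract_citas rag_results (extract_citas rag_results)

-- ===== LEMMAS AND PROOFS =====

-- A's loop, started from any accumulators, appends exactly the golden/normativa contents.
theorem extract_citas_foldl_eq (items : List (List (String × String)))
    (g n : List String) :
    items.foldl
      (fun acc item =>
        if (PySem.Dict.mk item).get? "type" == some "golden" then
          (acc.1 ++ [(PySem.Dict.mk item).getD "content" ""], acc.2)
        else if (PySem.Dict.mk item).get? "type" == some "normativa" then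
          (acc.1, acc.2 ++ [(PySem.Dict.mk item).getD "content" ""])
        else acc)
      (g, n)
    = (g ++ ((items.map (fun item => ((PySem.Dict.mk item).get? "type", (PySem.Dict.mk item).getD "content" ""))).filter
              (fun p => p.1 == some "golden")).map (·.2),
       n ++ ((items.map (fun item => ((PySem.Dict.mk item).get? "type", (PySem.Dict.mk item).getD "content" ""))).filter
              (fun p => p.1 == some "normativa")).map (·.2)) := by
  induction items generalizing g n with
  | nil => simp
  | cons item rest ih =>
    by_cases hg : (PySem.Dict.mk item).get? "type" = some "golden"
    · rw [List.foldl_cons, if_pos (by simp [hg]), ih]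
      simp [hg]
    · by_cases hn : (PySem.Dict.mk item).get? "type" = some "normativa"
      · rw [List.foldl_cons, if_neg (by simp [hg]), if_pos (by simp [hn]), ih]
        simp [hn]
      · rw [List.foldl_cons, if_neg (by simp [hg]), if_neg (by simp [hn]), ih]
        simp [hg, hn]

theorem extract_citas_spec' (rag_results : Option (List (List (String × String)))) :
    extract_citas rag_results = extract_citas_alt rag_results := by
  unfold extract_citas extract_citas_alt
  rw [extract_citas_foldl_eq]
  simp [PySem.Dict.getD_foldl_modify_append]

-- ===== VERDICT (by name: the statement is the Claim_ definition above) =====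
theorem extract_citas_spec : Claim_equal_extract_citas := by
  intro r _
  exact extract_citas_spec' r
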